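-- pv_equiv track=rewrite | github.com/behnamfani/MapReduce-to-find-similar-users | scripts/Movierate.py | second_reducer
-- ===== SOURCE A (Python) =====
-- def second_reducer(key, values):
--     # In this function we search and find the common genres that both users i and j from the input have voted to it.
--     # If both users have the same taste of this genre, similar_vote is added by one.
--     # Jaccard similarity is qual to similar_vote / all the common genre with same or different feelings from the
--     # users (vote). So the output of every reducer is consist of a key = (user i, user j) and values = "Similar" or
--     # "dissimilar" base on the result of the Jaccard similarity.
--     values = [x for x in values]
--     similar_voted, voted, result = 0, 0, 'dissimilar'
--     for i in range(len(values)):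
--         x = values[i]
--         for j in range(i+1, len(values)):
--             y = values[j]
--             if x[0] != y[0] and x[1] == x[1]:
--                 if x[2] == y[2]:
--                     similar_voted += 1
--                 voted += 1
--     if voted != 0:
--         if similar_voted/voted >= 0.5:
--             result = 'Similar'
--     yield key, result
-- ===== SOURCE B (Python) =====
-- def second_reducer(key, values):
--     # One pass: for each new row, count how many earlier rows pair with it,
--     # using hash-map counters instead of comparing it to every earlier row.
--     c0, c2, c02 = {}, {}, {}
--     seen, similar_voted, voted = 0, 0, 0
--     for a, b, c in values:
--         voted += seen - c0.get(a, 0)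
--         similar_voted += c2.get(c, 0) - c02.get((a, c), 0)
--         c0[a] = c0.get(a, 0) + 1
--         c2[c] = c2.get(c, 0) + 1
--         c02[(a, c)] = c02.get((a, c), 0) + 1
--         seen += 1
--     result = 'Similar' if voted != 0 and 2 * similar_voted >= voted else 'dissimilar'
--     yield key, result
-- ===== Notes on version B (the rewrite author's own statement) =====
-- stated objective: faster
-- what changed: Replaced A's O(n^2) double loop over all index pairs by a single pass that, for each new row, counts its pairs with the earlier rows using three hash-map counters keyed on x[0], x[2] and (x[0], x[2]).
import Mathlib
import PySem

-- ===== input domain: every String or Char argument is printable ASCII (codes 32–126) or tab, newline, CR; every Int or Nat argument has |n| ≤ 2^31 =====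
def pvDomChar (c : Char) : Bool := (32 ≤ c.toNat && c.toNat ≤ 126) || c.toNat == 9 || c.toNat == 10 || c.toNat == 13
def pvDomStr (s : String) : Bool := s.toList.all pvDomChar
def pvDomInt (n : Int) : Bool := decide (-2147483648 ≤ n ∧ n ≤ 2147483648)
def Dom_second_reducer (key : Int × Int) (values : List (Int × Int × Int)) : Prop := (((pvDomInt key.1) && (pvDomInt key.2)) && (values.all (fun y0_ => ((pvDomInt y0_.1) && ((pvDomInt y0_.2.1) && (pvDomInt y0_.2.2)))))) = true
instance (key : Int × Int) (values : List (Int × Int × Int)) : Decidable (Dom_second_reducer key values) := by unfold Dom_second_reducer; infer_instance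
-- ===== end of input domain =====

-- B replaces A's O(n^2) all-pairs double loop by a single pass that counts, for each new
-- row, its pairs with the earlier rows via three hash-map counters (on x[0], x[2] and
-- (x[0], x[2])).  Python's float test 'similar_voted/voted >= 0.5' is ported exactly as
-- '2 * similar_voted ≥ voted' (the two agree for every count reachable from a list).

-- ===== PORT A =====
def second_reducer (key : Int × Int) (values : List (Int × Int × Int)) : List ((Int × Int) × String) :=
  let n : Int := (values.length : Int)
  let sv : Int × Int :=
    (PySem.List.pyRange 0 n 1).foldl (fun sv i =>
      let x := PySem.List.pyGetD values i (0, 0, 0)   -- values[i]; i always in range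
      (PySem.List.pyRange (i + 1) n 1).foldl (fun sv j =>
        let y := PySem.List.pyGetD values j (0, 0, 0) -- values[j]; j always in range
        if x.1 ≠ y.1 ∧ x.2.1 = x.2.1 then
          ((if x.2.2 = y.2.2 then sv.1 + 1 else sv.1), sv.2 + 1)
        else sv) sv) (0, 0)
  let result : String := if sv.2 ≠ 0 ∧ 2 * sv.1 ≥ sv.2 then "Similar" else "dissimilar"
  [(key, result)]

-- ===== PORT B =====
def second_reducer_alt (key : Int × Int) (values : List (Int × Int × Int)) : List ((Int × Int) × String) :=
  let st : PySem.Dict Int Int × PySem.Dict Int Int × PySem.Dict (Int × Int) Int × Int × Int × Int :=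
    values.foldl (fun st v =>
      let (c0, c2, c02, seen, similar_voted, voted) := st
      let a := v.1
      let c := v.2.2
      let voted := voted + (seen - c0.getD a 0)
      let similar_voted := similar_voted + (c2.getD c 0 - c02.getD (a, c) 0)
      let c0 := c0.insert a (c0.getD a 0 + 1)
      let c2 := c2.insert c (c2.getD c 0 + 1)
      let c02 := c02.insert (a, c) (c02.getD (a, c) 0 + 1)
      (c0, c2, c02, seen + 1, similar_voted, voted))
      (PySem.Dict.empty, PySem.Dict.empty, PySem.Dict.empty, 0, 0, 0)
  let result : String :=
    if st.2.2.2.2.2 ≠ 0 ∧ 2 * st.2.2.2.2.1 ≥ st.2.2.2.2.2 then "Similar" else "dissimilar"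
  [(key, result)]

-- ===== PRECONDITION & SPEC =====
def Spec_second_reducer (key : Int × Int) (values : List (Int × Int × Int)) (out : List ((Int × Int) × String)) : Prop := out = second_reducer_alt key values
instance (key : Int × Int) (values : List (Int × Int × Int)) (out : List ((Int × Int) × String)) : Decidable (Spec_second_reducer key values out) := by unfold Spec_second_reducer; infer_instance

-- ===== CLAIM (what is proved, stated in full; the proofs are below) =====
def Claim_equal_second_reducer : Prop := ∀ (key : Int × Int) (values : List (Int × Int × Int)), Dom_second_reducer key values → Spec_second_reducer key values (second_reducer key values)

-- ===== LEMMAS AND PROOFS =====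

def simCount : List (Int × Int × Int) → Int
  | [] => 0
  | x :: t => (t.countP (fun y => decide (x.1 ≠ y.1 ∧ x.2.2 = y.2.2)) : Int) + simCount t

def votCount : List (Int × Int × Int) → Int
  | [] => 0
  | x :: t => (t.countP (fun y => decide (x.1 ≠ y.1)) : Int) + votCount t

def pairStep (x y : Int × Int × Int) (sv : Int × Int) : Int × Int :=
  if x.1 ≠ y.1 ∧ x.2.1 = x.2.1 then
    ((if x.2.2 = y.2.2 then sv.1 + 1 else sv.1), sv.2 + 1)
  else sv

theorem pairStep_fold (x : Int × Int × Int) :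
    ∀ (t : List (Int × Int × Int)) (s : Int × Int),
      t.foldl (fun sv y => pairStep x y sv) s
        = (s.1 + (t.countP (fun y => decide (x.1 ≠ y.1 ∧ x.2.2 = y.2.2)) : Int),
           s.2 + (t.countP (fun y => decide (x.1 ≠ y.1)) : Int)) := by
  intro t
  induction t with
  | nil => intro s; simp
  | cons h t ih =>
    intro s
    rw [List.foldl_cons, ih]
    simp only [List.countP_cons, pairStep]
    by_cases h1 : x.1 = h.1 <;> by_cases h2 : x.2.2 = h.2.2 <;>
      simp [h1, h2, Prod.ext_iff] <;> omega

theorem range_shift_fold {σ : Type} (f : σ → Int → σ) (a n : Int) (s : σ) :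
    (PySem.List.pyRange (a + 1) (n + 1) 1).foldl f s
      = (PySem.List.pyRange a n 1).foldl (fun s i => f s (i + 1)) s := by
  simp only [PySem.List.pyRange_one, List.foldl_map]
  have e : n + 1 - (a + 1) = n - a := by ring
  rw [e]
  congr 1
  funext s k
  congr 1
  ring

theorem getD_cons_shift (h : Int × Int × Int) (t : List (Int × Int × Int)) (a : Int)
    (ha : 0 ≤ a) :
    PySem.List.pyGetD (h :: t) (a + 1) (0, 0, 0) = PySem.List.pyGetD t a (0, 0, 0) := by
  lift a to ℕ using ha
  have : ((a : Int) + 1) = ((a + 1 : ℕ) : Int) := by push_cast; ring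
  rw [this, PySem.List.pyGetD_natCast, PySem.List.pyGetD_natCast]
  simp

theorem A_outer :
    ∀ (l : List (Int × Int × Int)) (s : Int × Int),
      (PySem.List.pyRange 0 (l.length : Int) 1).foldl (fun sv i =>
          (PySem.List.pyRange (i + 1) (l.length : Int) 1).foldl (fun sv j =>
            pairStep (PySem.List.pyGetD l i (0, 0, 0)) (PySem.List.pyGetD l j (0, 0, 0)) sv) sv) s
        = (s.1 + simCount l, s.2 + votCount l) := by
  intro l
  induction l with
  | nil => intro s; simp [PySem.List.pyRange_one_eq_nil, simCount, votCount]
  | cons h t ih =>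
    intro s
    have hlen : ((h :: t).length : Int) = (t.length : Int) + 1 := by push_cast [List.length_cons]; ring
    rw [hlen, PySem.List.pyRange_one_cons (by positivity)]
    rw [List.foldl_cons]
    -- the first outer iteration (i = 0): the inner loop runs over t against x = h
    have hfirst :
        (PySem.List.pyRange (0 + 1) ((t.length : Int) + 1) 1).foldl (fun sv j =>
            pairStep (PySem.List.pyGetD (h :: t) 0 (0, 0, 0)) (PySem.List.pyGetD (h :: t) j (0, 0, 0)) sv) s
          = (s.1 + (t.countP (fun y => decide (h.1 ≠ y.1 ∧ h.2.2 = y.2.2)) : Int),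
             s.2 + (t.countP (fun y => decide (h.1 ≠ y.1)) : Int)) := by
      have hlen' : ((t.length : Int) + 1) = PySem.List.len (h :: t) := by
        simp [PySem.List.len]
      rw [hlen', PySem.List.pyGetD_zero_cons,
        PySem.List.foldl_pyRange_pyGetD (h :: t) (0,0,0)
          (fun sv y => pairStep h y sv) s (a := 0 + 1) (by norm_num)]
      simp only [show ((0:Int)+1).toNat = 1 from rfl, List.drop_one, List.tail_cons]
      exact pairStep_fold h t s
    rw [hfirst]
    -- the remaining outer iterations shift down onto t
    rw [range_shift_fold]
    rw [PySem.List.foldl_congr_mem _ _ (fun sv i =>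
        (PySem.List.pyRange (i + 1) (t.length : Int) 1).foldl (fun sv j =>
          pairStep (PySem.List.pyGetD t i (0, 0, 0)) (PySem.List.pyGetD t j (0, 0, 0)) sv) sv) _ ?_]
    · rw [ih]
      simp only [simCount, votCount]
      simp [add_assoc]
    · intro acc i hi
      have hi0 : 0 ≤ i := (PySem.List.mem_pyRange_one.mp hi).1
      rw [getD_cons_shift h t i hi0]
      rw [range_shift_fold]
      apply PySem.List.foldl_congr_mem
      intro acc' j hj
      have hj0 : 0 ≤ j := le_trans (by omega) (PySem.List.mem_pyRange_one.mp hj).1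
      rw [getD_cons_shift h t j hj0]

theorem simCount_append (l : List (Int × Int × Int)) (v : Int × Int × Int) :
    simCount (l ++ [v])
      = simCount l + (l.countP (fun x => decide (x.1 ≠ v.1 ∧ x.2.2 = v.2.2)) : Int) := by
  induction l with
  | nil => simp [simCount]
  | cons h l ih =>
    simp only [List.cons_append, simCount, ih, List.countP_append, List.countP_cons,
      List.countP_nil]
    push_cast
    by_cases h1 : h.1 = v.1 <;> by_cases h2 : h.2.2 = v.2.2 <;> simp [h1, h2] <;> ring

theorem votCount_append (l : List (Int × Int × Int)) (v : Int × Int × Int) :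
    votCount (l ++ [v]) = votCount l + (l.countP (fun x => decide (x.1 ≠ v.1)) : Int) := by
  induction l with
  | nil => simp [votCount]
  | cons h l ih =>
    simp only [List.cons_append, votCount, ih, List.countP_append, List.countP_cons,
      List.countP_nil]
    push_cast
    by_cases h1 : h.1 = v.1 <;> simp [h1] <;> ring

theorem countP_split {α : Type} (l : List α) (p q : α → Bool) :
    l.countP (fun x => !p x && q x) + l.countP (fun x => p x && q x) = l.countP q := by
  induction l with
  | nil => simp
  | cons h l ih =>
    simp only [List.countP_cons]
    cases hp : p h <;> cases hq : q h <;> simp <;> omega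

theorem B_inv (l : List (Int × Int × Int)) :
    l.foldl (fun st v =>
        let (c0, c2, c02, seen, similar_voted, voted) := st
        let a := v.1
        let c := v.2.2
        let voted := voted + (seen - c0.getD a 0)
        let similar_voted := similar_voted + (c2.getD c 0 - c02.getD (a, c) 0)
        let c0 := c0.insert a (c0.getD a 0 + 1)
        let c2 := c2.insert c (c2.getD c 0 + 1)
        let c02 := c02.insert (a, c) (c02.getD (a, c) 0 + 1)
        ((c0, c2, c02, seen + 1, similar_voted, voted) :
          PySem.Dict Int Int × PySem.Dict Int Int × PySem.Dict (Int × Int) Int × Int × Int × Int))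
      (PySem.Dict.empty, PySem.Dict.empty, PySem.Dict.empty, 0, 0, 0)
      = (l.foldl (fun d x => d.insert x.1 (d.getD x.1 0 + 1)) PySem.Dict.empty,
         l.foldl (fun d x => d.insert x.2.2 (d.getD x.2.2 0 + 1)) PySem.Dict.empty,
         l.foldl (fun d x => d.insert (x.1, x.2.2) (d.getD (x.1, x.2.2) 0 + 1)) PySem.Dict.empty,
         (l.length : Int), simCount l, votCount l) := by
  induction l using List.reverseRecOn with
  | nil => simp [simCount, votCount]
  | append_singleton l v ih =>
    rw [List.foldl_append, List.foldl_append, List.foldl_append, List.foldl_append, ih]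
    simp only [List.foldl_cons, List.foldl_nil]
    refine Prod.ext rfl (Prod.ext rfl (Prod.ext rfl (Prod.ext ?_ (Prod.ext ?_ ?_))))
    · simp
    · -- similar_voted component
      show simCount l +
          ((l.foldl (fun d x => d.insert x.2.2 (d.getD x.2.2 0 + 1)) PySem.Dict.empty).getD v.2.2 0
            - (l.foldl (fun d x => d.insert (x.1, x.2.2) (d.getD (x.1, x.2.2) 0 + 1)) PySem.Dict.empty).getD (v.1, v.2.2) 0)
          = simCount (l ++ [v])
      rw [simCount_append]
      rw [← List.foldl_map (f := fun x : Int × Int × Int => x.2.2)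
            (g := fun (d : PySem.Dict Int Int) k => d.insert k (d.getD k 0 + 1)),
          ← List.foldl_map (f := fun x : Int × Int × Int => (x.1, x.2.2))
            (g := fun (d : PySem.Dict (Int × Int) Int) k => d.insert k (d.getD k 0 + 1))]
      rw [PySem.Dict.getD_foldl_insert_add_one, PySem.Dict.getD_foldl_insert_add_one]
      simp only [PySem.Dict.getD_empty, List.count_eq_countP, List.countP_map]
      have := countP_split l (fun x => decide (x.1 = v.1)) (fun x => decide (x.2.2 = v.2.2))
      have e1 : (fun x : Int × Int × Int => decide (x.1 ≠ v.1 ∧ x.2.2 = v.2.2))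
          = fun x => !decide (x.1 = v.1) && decide (x.2.2 = v.2.2) := by
        funext x; simp [decide_not]
      have e2 : ((fun k : Int => k == v.2.2) ∘ fun x : Int × Int × Int => x.2.2)
          = fun x : Int × Int × Int => decide (x.2.2 = v.2.2) := by
        funext x; rfl
      have e3 : ((fun k : Int × Int => k == (v.1, v.2.2)) ∘ fun x : Int × Int × Int => (x.1, x.2.2))
          = fun x : Int × Int × Int => decide (x.1 = v.1) && decide (x.2.2 = v.2.2) := by
        funext x; simp [Function.comp, BEq.beq]
      rw [e1] at *
      rw [e2, e3]
      omega
    · -- voted component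
      show votCount l +
          ((l.length : Int)
            - (l.foldl (fun d x => d.insert x.1 (d.getD x.1 0 + 1)) PySem.Dict.empty).getD v.1 0)
          = votCount (l ++ [v])
      rw [votCount_append]
      rw [← List.foldl_map (f := fun x : Int × Int × Int => x.1)
            (g := fun (d : PySem.Dict Int Int) k => d.insert k (d.getD k 0 + 1))]
      rw [PySem.Dict.getD_foldl_insert_add_one]
      simp only [PySem.Dict.getD_empty, List.count_eq_countP, List.countP_map]
      have hsplit := List.length_eq_countP_add_countP
        (fun x : Int × Int × Int => decide (x.1 = v.1)) (l := l)
      have e1 : (fun x : Int × Int × Int => decide ¬(decide (x.1 = v.1)) = true)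
          = fun x : Int × Int × Int => decide (x.1 ≠ v.1) := by
        funext x; simp
      have e2 : ((fun k : Int => k == v.1) ∘ fun x : Int × Int × Int => x.1)
          = fun x : Int × Int × Int => decide (x.1 = v.1) := by
        funext x; rfl
      rw [e1] at hsplit
      rw [e2]
      omega

-- ===== VERDICT (by name: the statement is the Claim_ definition above) =====
theorem second_reducer_spec : Claim_equal_second_reducer := by
  intro key values _
  unfold Spec_second_reducer
  have hA := A_outer values (0, 0)
  simp only [pairStep] at hA
  simp only [second_reducer, second_reducer_alt, hA, B_inv]
  simp
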